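-- pv_equiv track=rewrite | github.com/bellytina/Explicit_Role_Interaction_Network | evals.py | split_arg
-- ===== SOURCE A (Python) =====
-- def split_arg(tags):
--     ans = set()
--     for i,t in enumerate(tags):
--         if t==1: # B
--             frm = i
--             j = i+1
--             while(j < len(tags)):
--                 if tags[j]!=2:
--                     break
--                 j+=1
--             to = j-1
--             ans.add((frm, to))
--     return ans
-- ===== SOURCE B (Python) =====
-- def split_arg(tags):
--     # Single forward state-machine pass: `start` is the index of the
--     # currently open B-span (or None); spans are closed when a non-2 tag
--     # arrives and flushed at the end.  No inner run-scan.
--     ans = set()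
--     start = None
--     for i, t in enumerate(tags):
--         if t == 1:
--             if start is not None:
--                 ans.add((start, i - 1))
--             start = i
--         elif t != 2:
--             if start is not None:
--                 ans.add((start, i - 1))
--             start = None
--     if start is not None:
--         ans.add((start, len(tags) - 1))
--     return ans
-- ===== Notes on version B (the rewrite author's own statement) =====
-- stated objective: simpler
-- what changed: Replaces the per-B inner while-scan over the following 2-run by a single flat state-machine pass that keeps the open span's start and closes it when a non-2 tag (or the end) arrives.
import Mathlib
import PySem

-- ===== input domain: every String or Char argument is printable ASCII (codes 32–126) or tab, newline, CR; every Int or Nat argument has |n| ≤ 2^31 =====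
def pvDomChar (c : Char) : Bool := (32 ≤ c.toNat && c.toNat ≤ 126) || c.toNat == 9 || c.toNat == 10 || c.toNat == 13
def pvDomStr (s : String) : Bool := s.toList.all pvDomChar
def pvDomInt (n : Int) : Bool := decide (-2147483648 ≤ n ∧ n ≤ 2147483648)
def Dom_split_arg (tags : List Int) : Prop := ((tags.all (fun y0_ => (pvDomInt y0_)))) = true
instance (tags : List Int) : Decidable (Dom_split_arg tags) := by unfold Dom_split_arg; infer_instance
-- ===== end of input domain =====

-- B replaces A's per-B inner while-scan by one flat state-machine pass (objective: simpler).
-- In both ports, Python's set.add is a plain append: every added pair's first component is the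
-- current index i, strictly larger than the first component of every pair added earlier, so a
-- duplicate never arises and the distinct-element list representation is exact.

-- ===== PORT A =====
-- inner 'while j < len(tags): if tags[j]!=2: break; j+=1' returning the final j
def pvScanA (tags : List Int) (j : Nat) : Nat :=
  if h : j < tags.length then
    (if tags[j] = 2 then pvScanA tags (j+1) else j)
  else j
termination_by tags.length - j

-- 'for i,t in enumerate(tags)' as recursion on the index i
def pvGoA (tags : List Int) (i : Nat) (ans : List (Int × Int)) : List (Int × Int) :=
  if h : i < tags.length then
    pvGoA tags (i+1)
      (if tags[i] = 1 then ans ++ [((i : Int), (pvScanA tags (i+1) : Int) - 1)] else ans)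
  else ans
termination_by tags.length - i

def split_arg (tags : List Int) : List (Int × Int) := pvGoA tags 0 []

-- ===== PORT B =====
-- one pass with state (start, ans); after the loop, flush the open span
def pvGoB (tags : List Int) (i : Nat) (start : Option Nat) (ans : List (Int × Int)) :
    List (Int × Int) :=
  if h : i < tags.length then
    if tags[i] = 1 then
      pvGoB tags (i+1) (some i)
        (match start with
         | some s => ans ++ [((s : Int), (i : Int) - 1)]
         | none => ans)
    else if tags[i] = 2 then
      pvGoB tags (i+1) start ans
    else
      pvGoB tags (i+1) none
        (match start with
         | some s => ans ++ [((s : Int), (i : Int) - 1)]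
         | none => ans)
  else
    match start with
    | some s => ans ++ [((s : Int), (tags.length : Int) - 1)]
    | none => ans
termination_by tags.length - i

def split_arg_alt (tags : List Int) : List (Int × Int) := pvGoB tags 0 none []

-- ===== PRECONDITION & SPEC =====
def Spec_split_arg (tags : List Int) (out : List (Int × Int)) : Prop := out = split_arg_alt tags
instance (tags : List Int) (out : List (Int × Int)) : Decidable (Spec_split_arg tags out) := by unfold Spec_split_arg; infer_instance

-- ===== CLAIM (what is proved, stated in full; the proofs are below) =====
def Claim_equal_split_arg : Prop := ∀ (tags : List Int), Dom_split_arg tags → Spec_split_arg tags (split_arg tags)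

-- ===== LEMMAS AND PROOFS =====

-- the span A has already recorded for the currently open B (if any), seen from position i
def pvPend (tags : List Int) (i : Nat) : Option Nat → List (Int × Int)
  | some s => [((s : Int), (pvScanA tags i : Int) - 1)]
  | none => []

theorem pvScanA_step (tags : List Int) (j : Nat)
    (hj : j < tags.length) (h2 : tags[j] = 2) : pvScanA tags j = pvScanA tags (j+1) := by
  conv_lhs => rw [pvScanA]
  rw [dif_pos hj, if_pos h2]

theorem pvKey (tags : List Int) :
    ∀ n i start ans, tags.length ≤ i + n → i ≤ tags.length →
      pvGoA tags i (ans ++ pvPend tags i start) = pvGoB tags i start ans := by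
  intro n
  induction n with
  | zero =>
    intro i start ans hn hi
    have hie : i = tags.length := le_antisymm hi (by omega)
    subst hie
    have hs : pvScanA tags tags.length = tags.length := by
      unfold pvScanA; rw [dif_neg (by omega)]
    unfold pvGoA pvGoB
    rw [dif_neg (by omega), dif_neg (by omega)]
    cases start with
    | none => simp [pvPend]
    | some s => simp [pvPend, hs]
  | succ n ih =>
    intro i start ans hn hi
    by_cases hlt : i < tags.length
    · unfold pvGoA pvGoB
      rw [dif_pos hlt, dif_pos hlt]
      by_cases h1 : tags[i] = 1
      · -- tag 1: scan stops at i, A's pending equals B's closed span; new pending is (i, scan(i+1)-1)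
        rw [if_pos h1, if_pos h1]
        have hs : pvScanA tags i = i := by
          unfold pvScanA; rw [dif_pos hlt, if_neg (by omega)]
        cases start with
        | none => simpa [pvPend] using ih (i+1) (some i) ans (by omega) (by omega)
        | some s =>
          simpa [pvPend, hs] using
            ih (i+1) (some i) (ans ++ [((s : Int), (i : Int) - 1)]) (by omega) (by omega)
      · rw [if_neg h1, if_neg h1]
        by_cases h2 : tags[i] = 2
        · -- tag 2: pending span extends; scan from i equals scan from i+1
          rw [if_pos h2]
          have hs : pvScanA tags i = pvScanA tags (i+1) := pvScanA_step tags i hlt h2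
          cases start with
          | none => simpa [pvPend] using ih (i+1) none ans (by omega) (by omega)
          | some s =>
            simpa [pvPend, hs] using ih (i+1) (some s) ans (by omega) (by omega)
        · -- other tag: scan stops at i; A's pending equals B's closed span; no new pending
          rw [if_neg h2]
          have hs : pvScanA tags i = i := by
            unfold pvScanA; rw [dif_pos hlt, if_neg h2]
          cases start with
          | none => simpa [pvPend] using ih (i+1) none ans (by omega) (by omega)
          | some s =>
            simpa [pvPend, hs] using
              ih (i+1) none (ans ++ [((s : Int), (i : Int) - 1)]) (by omega) (by omega)
    · -- i = tags.length: same as the base case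
      have hie : i = tags.length := le_antisymm hi (by omega)
      subst hie
      have hs : pvScanA tags tags.length = tags.length := by
        unfold pvScanA; rw [dif_neg (by omega)]
      unfold pvGoA pvGoB
      rw [dif_neg (by omega), dif_neg (by omega)]
      cases start with
      | none => simp [pvPend]
      | some s => simp [pvPend, hs]

-- ===== VERDICT (by name: the statement is the Claim_ definition above) =====
theorem split_arg_spec : Claim_equal_split_arg := by
  intro tags _
  unfold Spec_split_arg split_arg split_arg_alt
  have := pvKey tags tags.length 0 none [] (by omega) (by omega)
  simpa [pvPend] using this
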